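-- pv_equiv track=rewrite | github.com/AdamZhouSE/pythonHomework | Code/Cases/2684/.mooctest/answer.py | calc
-- ===== SOURCE A (Python) =====
-- def calc(arr, n):
--     incl = arr[0]
--     excl = 0
--
--     for i in range(1, n):
--         incl_new = arr[i] + min(incl, excl)
--
--         excl = incl
--         incl = incl_new
--
--     return min(incl, excl)
-- ===== SOURCE B (Python) =====
-- def calc(arr, n):
--     # The DP recurrence (incl', excl') = (arr[i] + min(incl, excl), incl) is
--     # linear over the (min,+) semiring, so the answer is a 2x2 min-plus matrix
--     # product (computed by divide and conquer) applied to the start vector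
--     # (arr[0], 0).  None plays the role of +infinity.
--     def omin(x, y):
--         if x is None:
--             return y
--         if y is None:
--             return x
--         return x if x < y else y
--
--     def oadd(x, y):
--         if x is None or y is None:
--             return None
--         return x + y
--
--     def mmul(A, B):
--         return (omin(oadd(A[0], B[0]), oadd(A[1], B[2])),
--                 omin(oadd(A[0], B[1]), oadd(A[1], B[3])),
--                 omin(oadd(A[2], B[0]), oadd(A[3], B[2])),
--                 omin(oadd(A[2], B[1]), oadd(A[3], B[3])))
--
--     MID = (0, None, None, 0)
--
--     def dc(ms):
--         if len(ms) == 0: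
--             return MID
--         if len(ms) == 1:
--             return ms[0]
--         k = len(ms) // 2
--         return mmul(dc(ms[:k]), dc(ms[k:]))
--
--     mats = [(arr[i], arr[i], 0, None) for i in range(1, n)][::-1]
--     P = dc(mats)
--     x0, y0 = arr[0], 0
--     rx = omin(oadd(P[0], x0), oadd(P[1], y0))
--     ry = omin(oadd(P[2], x0), oadd(P[3], y0))
--     return omin(rx, ry)
-- ===== Notes on version B (the rewrite author's own statement) =====
-- stated objective: alternative
-- what changed: B reformulates A's rolling two-variable DP as a product of 2x2 min-plus step matrices (None as +infinity) computed by divide-and-conquer and applied to the start vector (arr[0], 0).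
import Mathlib
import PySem

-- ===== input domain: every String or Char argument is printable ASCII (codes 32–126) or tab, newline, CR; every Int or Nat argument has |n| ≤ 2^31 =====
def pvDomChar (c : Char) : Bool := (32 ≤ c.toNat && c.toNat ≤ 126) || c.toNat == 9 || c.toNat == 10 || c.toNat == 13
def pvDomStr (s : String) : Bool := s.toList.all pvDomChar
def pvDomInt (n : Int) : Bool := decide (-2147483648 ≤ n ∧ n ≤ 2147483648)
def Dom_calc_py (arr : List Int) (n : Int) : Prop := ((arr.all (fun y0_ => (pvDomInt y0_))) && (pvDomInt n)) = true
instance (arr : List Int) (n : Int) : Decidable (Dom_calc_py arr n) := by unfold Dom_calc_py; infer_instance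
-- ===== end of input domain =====

-- B reformulates A's rolling DP as a product of 2x2 min-plus step matrices
-- computed by divide and conquer, applied to the start vector; an alternative
-- algorithm, not claimed faster.

-- ===== PORT A =====
-- Literal port of A: incl = arr[0]; excl = 0; for i in range(1, n): rolling
-- update; return min(incl, excl).  arr[i] is in range under Pre_, so pyGetD.
def calc_py (arr : List Int) (n : Int) : Int :=
  let incl := PySem.List.pyGetD arr 0 0
  let p := (PySem.List.pyRange 1 n 1).foldl
    (fun (s : Int × Int) i =>
      let incl_new := PySem.List.pyGetD arr i 0 + min s.1 s.2
      (incl_new, s.1)) (incl, 0)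
  min p.1 p.2

-- ===== PORT B =====
-- Port of Source B.  `None` (Python's +infinity) is `none`; a matrix is the
-- 4-tuple of its entries, kept as a structure for readability.
structure PVMat where
  a : Option Int
  b : Option Int
  c : Option Int
  d : Option Int
deriving DecidableEq, Repr

-- omin: Python's `x if x < y else y` with None as identity
def pvOmin : Option Int → Option Int → Option Int
  | none, y => y
  | x, none => x
  | some x, some y => some (if x < y then x else y)

-- oadd: addition with None absorbing
def pvOadd : Option Int → Option Int → Option Int
  | none, _ => none
  | _, none => none
  | some x, some y => some (x + y)

def pvMmul (A B : PVMat) : PVMat :=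
  ⟨pvOmin (pvOadd A.a B.a) (pvOadd A.b B.c),
   pvOmin (pvOadd A.a B.b) (pvOadd A.b B.d),
   pvOmin (pvOadd A.c B.a) (pvOadd A.d B.c),
   pvOmin (pvOadd A.c B.b) (pvOadd A.d B.d)⟩

def pvMID : PVMat := ⟨some 0, none, none, some 0⟩

-- dc: divide-and-conquer product of the matrix list (ms[:k] / ms[k:] = take/drop)
def pvDC (ms : List PVMat) : PVMat :=
  if _h0 : ms.length = 0 then pvMID
  else if _h1 : ms.length = 1 then ms.headD pvMID
  else
    let k := ms.length / 2
    pvMmul (pvDC (ms.take k)) (pvDC (ms.drop k))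
termination_by ms.length
decreasing_by
  · simp only [List.length_take]; omega
  · simp only [List.length_drop]; omega

def calc_py_alt (arr : List Int) (n : Int) : Int :=
  -- mats = [(arr[i], arr[i], 0, None) for i in range(1, n)][::-1]  ([::-1] = reverse)
  let mats := ((PySem.List.pyRange 1 n 1).map
      (fun i => (⟨some (PySem.List.pyGetD arr i 0), some (PySem.List.pyGetD arr i 0),
                  some 0, none⟩ : PVMat))).reverse
  let P := pvDC mats
  let x0 : Option Int := some (PySem.List.pyGetD arr 0 0)
  let y0 : Option Int := some 0
  let rx := pvOmin (pvOadd P.a x0) (pvOadd P.b y0)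
  let ry := pvOmin (pvOadd P.c x0) (pvOadd P.d y0)
  -- Python returns the resulting int; it is provably `some _` here
  (pvOmin rx ry).getD 0

-- ===== PRECONDITION & SPEC =====
-- Pre_ excludes exactly the inputs where Python A raises IndexError:
-- an empty arr (arr[0]) or n exceeding len(arr) (arr[i] in the loop).
def Pre_calc_py (arr : List Int) (n : Int) : Prop :=
  arr ≠ [] ∧ n ≤ (arr.length : Int)
instance (arr : List Int) (n : Int) : Decidable (Pre_calc_py arr n) := by
  unfold Pre_calc_py; infer_instance
def pvWitness_calc_py : List Int × Int := ([3, -1, 4, -1, 5], 5)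

def Spec_calc_py (arr : List Int) (n : Int) (out : Int) : Prop := out = calc_py_alt arr n
instance (arr : List Int) (n : Int) (out : Int) : Decidable (Spec_calc_py arr n out) := by
  unfold Spec_calc_py; infer_instance

-- ===== CLAIM (what is proved, stated in full; the proofs are below) =====
def Claim_equal_calc_py : Prop := ∀ (arr : List Int) (n : Int), Dom_calc_py arr n → Pre_calc_py arr n → Spec_calc_py arr n (calc_py arr n)

-- ===== LEMMAS AND PROOFS =====

-- applying a matrix to a column vector
def pvVapp (P : PVMat) (x y : Option Int) : Option Int × Option Int :=
  (pvOmin (pvOadd P.a x) (pvOadd P.b y), pvOmin (pvOadd P.c x) (pvOadd P.d y))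

theorem pvOmin_min (x y : Int) : pvOmin (some x) (some y) = some (min x y) := by
  simp only [pvOmin, Option.some.injEq]
  split_ifs <;> omega

theorem pvOmin_comm (x y : Option Int) : pvOmin x y = pvOmin y x := by
  cases x <;> cases y <;> simp only [pvOmin, Option.some.injEq] <;> split_ifs <;> omega

theorem pvOmin_assoc (x y z : Option Int) :
    pvOmin (pvOmin x y) z = pvOmin x (pvOmin y z) := by
  cases x <;> cases y <;> cases z <;> simp only [pvOmin, Option.some.injEq] <;>
    split_ifs <;> omega

theorem pvOmin_left_comm (x y z : Option Int) :
    pvOmin x (pvOmin y z) = pvOmin y (pvOmin x z) := by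
  rw [← pvOmin_assoc, pvOmin_comm x y, pvOmin_assoc]

theorem pvOmin_swap (a b c d : Option Int) :
    pvOmin (pvOmin a b) (pvOmin c d) = pvOmin (pvOmin a c) (pvOmin b d) := by
  rw [pvOmin_assoc, pvOmin_assoc, pvOmin_left_comm b c d]

theorem pvOadd_assoc (x y z : Option Int) :
    pvOadd (pvOadd x y) z = pvOadd x (pvOadd y z) := by
  cases x <;> cases y <;> cases z <;> simp [pvOadd, add_assoc]

theorem pvOadd_omin_right (x y z : Option Int) :
    pvOadd (pvOmin x y) z = pvOmin (pvOadd x z) (pvOadd y z) := by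
  cases x <;> cases y <;> cases z <;>
    simp only [pvOadd, pvOmin, Option.some.injEq] <;> split_ifs <;> omega

theorem pvOadd_omin_left (x y z : Option Int) :
    pvOadd x (pvOmin y z) = pvOmin (pvOadd x y) (pvOadd x z) := by
  cases x <;> cases y <;> cases z <;>
    simp only [pvOadd, pvOmin, Option.some.injEq] <;> split_ifs <;> omega

theorem pvVapp_mmul (A B : PVMat) (x y : Option Int) :
    pvVapp (pvMmul A B) x y = pvVapp A (pvVapp B x y).1 (pvVapp B x y).2 := by
  simp only [pvVapp, pvMmul, pvOadd_omin_right, pvOadd_omin_left, pvOadd_assoc,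
    Prod.mk.injEq]
  constructor <;> apply pvOmin_swap

theorem pvVapp_mid (x y : Option Int) : pvVapp pvMID x y = (x, y) := by
  cases x <;> cases y <;> simp [pvVapp, pvMID, pvOadd, pvOmin]

-- dc computes the left-to-right product: applying it equals folding each
-- matrix over the vector from the right
theorem pvVapp_dc (ms : List PVMat) : ∀ x y,
    pvVapp (pvDC ms) x y
      = ms.foldr (fun m (v : Option Int × Option Int) => pvVapp m v.1 v.2) (x, y) := by
  induction ms using pvDC.induct with
  | case1 ms h0 =>
    intro x y
    have : ms = [] := List.length_eq_zero_iff.mp h0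
    subst this
    rw [pvDC]
    simp [pvVapp_mid]
  | case2 ms h0 h1 =>
    intro x y
    obtain ⟨m, rfl⟩ := List.length_eq_one_iff.mp h1
    rw [pvDC]
    simp
  | case3 ms h0 h1 k ih1 ih2 =>
    intro x y
    rw [pvDC]
    simp only [h0, h1, dite_false]
    rw [pvVapp_mmul, ih2, ih1]
    conv_rhs => rw [← List.take_append_drop k ms]
    rw [List.foldr_append]

-- a single step matrix applied to a finite vector is A's loop body
theorem pvVapp_step (v x y : Int) :
    pvVapp ⟨some v, some v, some 0, none⟩ (some x) (some y)
      = (some (v + min x y), some x) := by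
  simp only [pvVapp, pvOadd, pvOmin, Prod.mk.injEq, Option.some.injEq]
  constructor
  · split_ifs <;> omega
  · omega

-- folding the reversed step-matrix list over the vector = A's forward foldl
theorem pvFold_steps (g : Int → Int) (is : List Int) : ∀ (x y : Int),
    ((is.map (fun i => (⟨some (g i), some (g i), some 0, none⟩ : PVMat))).reverse).foldr
        (fun m (v : Option Int × Option Int) => pvVapp m v.1 v.2) (some x, some y)
      = (some ((is.foldl (fun (s : Int × Int) i =>
            (g i + min s.1 s.2, s.1)) (x, y)).1),
         some ((is.foldl (fun (s : Int × Int) i =>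
            (g i + min s.1 s.2, s.1)) (x, y)).2)) := by
  induction is with
  | nil => intro x y; simp
  | cons i is ih =>
    intro x y
    simp only [List.map_cons, List.reverse_cons, List.foldr_append, List.foldr_cons,
      List.foldr_nil, List.foldl_cons]
    rw [pvVapp_step]
    exact ih (g i + min x y) x

-- ===== VERDICT (by name: the statement is the Claim_ definition above) =====
theorem calc_py_spec : Claim_equal_calc_py := by
  intro arr n _ _
  unfold Spec_calc_py calc_py calc_py_alt
  dsimp only
  have h := pvVapp_dc ((PySem.List.pyRange 1 n 1).map
      (fun i => (⟨some (PySem.List.pyGetD arr i 0), some (PySem.List.pyGetD arr i 0),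
                  some 0, none⟩ : PVMat))).reverse
    (some (PySem.List.pyGetD arr 0 0)) (some 0)
  rw [pvFold_steps (fun i => PySem.List.pyGetD arr i 0) (PySem.List.pyRange 1 n 1)] at h
  simp only [pvVapp, Prod.mk.injEq] at h
  rw [h.1, h.2, pvOmin_min, Option.getD_some]
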